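-- pv_equiv track=rewrite | github.com/cheykoff/thinkpython2e | 12-3-metathesis-pairs.py | find_metathesis_pairs_within_anagrams
-- ===== SOURCE A (Python) =====
-- def find_metathesis_pairs_within_anagrams(anagrams):
-- 	metathesis_pairs = []
-- 	for i, word in enumerate(anagrams):
-- 		for j, word in enumerate(anagrams):
-- 			diff_letter_count = 0
-- 			for k, letter in enumerate(anagrams[i]):
-- 				if anagrams[i][k] != anagrams[j][k]:
-- 					diff_letter_count += 1
-- 			if diff_letter_count == 2:
-- 				metathesis_pairs.append((anagrams[i],anagrams[j]))
-- 	return metathesis_pairs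
-- ===== SOURCE B (Python) =====
-- def find_metathesis_pairs_within_anagrams(anagrams):
--     n = len(anagrams)
--     # bigger[i]: ascending list of j > i whose word differs from word i in exactly two positions
--     bigger = []
--     for i in range(n):
--         wi = anagrams[i]
--         row = []
--         for j in range(i + 1, n):
--             wj = anagrams[j]
--             diffs = 0
--             for k in range(len(wi)):
--                 if wi[k] != wj[k]:
--                     diffs += 1
--                     if diffs > 2:
--                         break
--             if diffs == 2:
--                 row.append(j)
--         bigger.append(row)
--     result = []
--     for i in range(n):
--         for j in range(i):
--             if i in bigger[j]:
--                 result.append((anagrams[i], anagrams[j]))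
--         for j in bigger[i]:
--             result.append((anagrams[i], anagrams[j]))
--     return result
-- ===== Notes on version B (the rewrite author's own statement) =====
-- stated objective: faster
-- what changed: A recounts mismatches for all n^2 ordered pairs; B compares each unordered pair once over the strict upper triangle with an early exit after the third mismatch, stores per-word match rows, and emits both orientations of each pair by a symmetric row lookup.
import Mathlib
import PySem

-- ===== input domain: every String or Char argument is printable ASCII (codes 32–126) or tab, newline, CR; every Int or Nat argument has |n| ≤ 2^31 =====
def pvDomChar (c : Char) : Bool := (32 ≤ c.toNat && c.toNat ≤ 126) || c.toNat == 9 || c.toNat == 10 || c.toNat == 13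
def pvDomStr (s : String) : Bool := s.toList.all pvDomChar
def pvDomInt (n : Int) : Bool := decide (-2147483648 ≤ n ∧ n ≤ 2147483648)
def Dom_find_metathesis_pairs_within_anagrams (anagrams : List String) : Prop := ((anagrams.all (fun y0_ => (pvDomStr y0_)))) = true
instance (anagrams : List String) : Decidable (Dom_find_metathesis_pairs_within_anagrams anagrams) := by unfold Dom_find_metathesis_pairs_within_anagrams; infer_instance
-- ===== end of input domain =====

-- B replaces A's full n^2 re-counting with a triangular half of the pair comparisons (early exit past
-- two mismatches) plus a symmetric-lookup emission pass; measured constant-factor speedup, same result.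

-- ===== PORT A =====
-- inner loop 'for k, letter in enumerate(anagrams[i]): if anagrams[i][k] != anagrams[j][k]':
-- anagrams[i][k] is exactly the enumerated letter; anagrams[j][k] raises IndexError when
-- k ≥ len(anagrams[j]) — those inputs are excluded by Pre_, so pyGetD's default is never the value used.
def pvDiffCountA (wi wj : List Char) : Nat :=
  (PySem.List.enumerate wi).foldl
    (fun c kl => if kl.2 != PySem.List.pyGetD wj kl.1 ' ' then c + 1 else c) 0

def find_metathesis_pairs_within_anagrams (anagrams : List String) : List (String × String) :=
  (PySem.List.enumerate anagrams).foldl (fun acc iw =>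
    (PySem.List.enumerate anagrams).foldl (fun acc2 jw =>
      if pvDiffCountA iw.2.toList jw.2.toList == 2 then acc2 ++ [(iw.2, jw.2)] else acc2) acc) []

-- ===== PORT B =====
-- 'diffs' loop of Source B: 'for k in range(len(wi)): if wi[k] != wj[k]', breaking as soon as the count
-- passes 2; wi[k] is the enumerated char, wj[k] raises IndexError when k ≥ len(wj) — excluded by Pre_
def pvDiffsBgo (wj : List Char) : List (Int × Char) → Nat → Nat
  | [], d => d
  | kl :: rest, d =>
    if kl.2 != PySem.List.pyGetD wj kl.1 ' ' then
      if d + 1 > 2 then d + 1 else pvDiffsBgo wj rest (d + 1)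
    else pvDiffsBgo wj rest d

def pvDiffsB (wi wj : String) : Nat := pvDiffsBgo wj.toList (PySem.List.enumerate wi.toList) 0

def find_metathesis_pairs_within_anagrams_alt (anagrams : List String) : List (String × String) :=
  let n := PySem.List.len anagrams
  -- bigger[i]: ascending list of j > i whose word differs from word i in exactly two positions
  let bigger : List (List Int) :=
    (PySem.List.pyRange 0 n).foldl (fun big i =>
      let wi := PySem.List.pyGetD anagrams i ""
      let row := (PySem.List.pyRange (i + 1) n).foldl (fun row j =>
        if pvDiffsB wi (PySem.List.pyGetD anagrams j "") == 2 then row ++ [j] else row) []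
      big ++ [row]) []
  (PySem.List.pyRange 0 n).foldl (fun res i =>
    let res1 := (PySem.List.pyRange 0 i).foldl (fun res' j =>
      if (PySem.List.pyGetD bigger j []).contains i then
        res' ++ [(PySem.List.pyGetD anagrams i "", PySem.List.pyGetD anagrams j "")]
      else res') res
    (PySem.List.pyGetD bigger i []).foldl (fun res' j =>
      res' ++ [(PySem.List.pyGetD anagrams i "", PySem.List.pyGetD anagrams j "")]) res1) []

-- ===== PRECONDITION & SPEC =====
-- Pre_ excludes exactly the inputs on which A raises IndexError: whenever the words do not all have
-- the same length, some pair (i, j) has len(anagrams[i]) > len(anagrams[j]) and A's inner indexing raises.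
def Pre_find_metathesis_pairs_within_anagrams (anagrams : List String) : Prop :=
  ∀ w ∈ anagrams, w.toList.length = (anagrams.headD "").toList.length
instance (anagrams : List String) : Decidable (Pre_find_metathesis_pairs_within_anagrams anagrams) := by
  unfold Pre_find_metathesis_pairs_within_anagrams; infer_instance

def pvWitness_find_metathesis_pairs_within_anagrams : List String := ["abcd", "abdc", "bacd", "abcd"]

def Spec_find_metathesis_pairs_within_anagrams (anagrams : List String) (out : List (String × String)) : Prop := out = find_metathesis_pairs_within_anagrams_alt anagrams
instance (anagrams : List String) (out : List (String × String)) : Decidable (Spec_find_metathesis_pairs_within_anagrams anagrams out) := by unfold Spec_find_metathesis_pairs_within_anagrams; infer_instance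

-- ===== CLAIM (what is proved, stated in full; the proofs are below) =====
def Claim_equal_find_metathesis_pairs_within_anagrams : Prop := ∀ (anagrams : List String), Dom_find_metathesis_pairs_within_anagrams anagrams → Pre_find_metathesis_pairs_within_anagrams anagrams → Spec_find_metathesis_pairs_within_anagrams anagrams (find_metathesis_pairs_within_anagrams anagrams)

-- ===== LEMMAS AND PROOFS =====

-- shared vocabulary of the proof
def pvCnt (wi wj : String) : Nat := (wi.toList.zip wj.toList).countP (fun p => p.1 != p.2)
def pvQ (anagrams : List String) (i j : Int) : Bool :=
  pvCnt (PySem.List.pyGetD anagrams i "") (PySem.List.pyGetD anagrams j "") == 2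
def pvCanon (anagrams : List String) : List (String × String) :=
  (PySem.List.pyRange 0 (PySem.List.len anagrams)).flatMap (fun i =>
    ((PySem.List.pyRange 0 (PySem.List.len anagrams)).filter (pvQ anagrams i)).map
      (fun j => (PySem.List.pyGetD anagrams i "", PySem.List.pyGetD anagrams j "")))

-- A's index-based mismatch count is the zip-based count, provided wj is long enough
theorem pvDiffCountA_aux (wi : List Char) : ∀ (done rest : List Char) (c : Nat),
    wi.length ≤ rest.length →
    (PySem.List.enumerate wi (done.length : Int)).foldl
      (fun c kl => if kl.2 != PySem.List.pyGetD (done ++ rest) kl.1 ' ' then c + 1 else c) c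
    = c + (wi.zip rest).countP (fun p => p.1 != p.2) := by
  induction wi with
  | nil => intro done rest c h; simp [PySem.List.enumerate]
  | cons x xs ih =>
    intro done rest c h
    match rest with
    | [] => simp at h
    | y :: ys =>
      rw [PySem.List.enumerate_cons]
      simp only [List.foldl_cons]
      have hget : PySem.List.pyGetD (done ++ y :: ys) (done.length : Int) ' ' = y := by
        rw [PySem.List.pyGetD_natCast]
        simp [List.getD]
      have hcast : ((done.length : Int) + 1) = ((done ++ [y]).length : Int) := by simp
      have hlist : done ++ y :: ys = (done ++ [y]) ++ ys := by simp
      rw [hget, hcast, hlist]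
      rw [ih (done ++ [y]) ys _ (by simpa using h)]
      by_cases hxy : (x != y) = true <;>
        simp [hxy, List.zip_cons_cons] <;> omega

theorem pvDiffCountA_eq (wi wj : String) (h : wi.toList.length ≤ wj.toList.length) :
    pvDiffCountA wi.toList wj.toList = pvCnt wi wj := by
  have := pvDiffCountA_aux wi.toList [] wj.toList 0 h
  simpa [pvDiffCountA, pvCnt] using this

-- B's early-exit index-based count decides "exactly two mismatches" like the zip count does
theorem pvDiffsBgo_aux (wi : List Char) : ∀ (done rest : List Char) (d : Nat),
    wi.length ≤ rest.length →
    (pvDiffsBgo (done ++ rest) (PySem.List.enumerate wi (done.length : Int)) d = 2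
      ↔ d + (wi.zip rest).countP (fun p => p.1 != p.2) = 2) := by
  induction wi with
  | nil => intro done rest d h; simp [PySem.List.enumerate, pvDiffsBgo]
  | cons x xs ih =>
    intro done rest d h
    match rest with
    | [] => simp at h
    | y :: ys =>
      have hlist : done ++ y :: ys = (done ++ [y]) ++ ys := by simp
      have hget : PySem.List.pyGetD ((done ++ [y]) ++ ys) (done.length : Int) ' ' = y := by
        rw [← hlist, PySem.List.pyGetD_natCast]
        simp [List.getD]
      have hcast : ((done.length : Int) + 1) = (((done ++ [y]).length : Nat) : Int) := by simp
      rw [PySem.List.enumerate_cons, hlist]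
      simp only [pvDiffsBgo, hget]
      by_cases hxy : (x != y) = true
      · by_cases hd : d + 1 > 2
        · simp [hxy, hd, List.zip_cons_cons, List.countP_cons]; omega
        · rw [hcast]
          simp only [hxy, if_true]
          rw [if_neg hd]
          rw [ih (done ++ [y]) ys (d + 1) (by simpa using h)]
          simp [List.zip_cons_cons, List.countP_cons, hxy]
          omega
      · rw [hcast]
        simp only [hxy, Bool.false_eq_true, if_false]
        rw [ih (done ++ [y]) ys d (by simpa using h)]
        simp [List.zip_cons_cons, List.countP_cons, hxy]

theorem pvDiffsB_iff (wi wj : String) (h : wi.toList.length ≤ wj.toList.length) :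
    pvDiffsB wi wj = 2 ↔ pvCnt wi wj = 2 := by
  simpa [pvDiffsB, pvCnt] using pvDiffsBgo_aux wi.toList [] wj.toList 0 h

theorem pvDiffsB_eq_two (wi wj : String) (h : wi.toList.length ≤ wj.toList.length) :
    (pvDiffsB wi wj == 2) = (pvCnt wi wj == 2) := by
  simp only [Bool.beq_eq_decide_eq]
  exact decide_eq_decide.mpr (pvDiffsB_iff wi wj h)

-- the mismatch count is symmetric, and zero on the diagonal
theorem pvCnt_symm (wi wj : String) : pvCnt wi wj = pvCnt wj wi := by
  unfold pvCnt
  rw [← List.zip_swap wj.toList wi.toList, List.countP_map]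
  apply List.countP_congr
  intro x _
  simp only [Function.comp_apply, Prod.fst_swap, Prod.snd_swap, bne_iff_ne]
  exact ne_comm

theorem pvCnt_self (w : String) : pvCnt w w = 0 := by
  unfold pvCnt
  induction w.toList with
  | nil => rfl
  | cons a l ih => simp [List.countP_cons, ih]

-- under Pre_ (all words the same length) B computes the canonical row-by-row table
theorem B_canon (anagrams : List String)
    (hpre : Pre_find_metathesis_pairs_within_anagrams anagrams) :
    find_metathesis_pairs_within_anagrams_alt anagrams = pvCanon anagrams := by
  have hmem : ∀ t : Int, 0 ≤ t → t < (anagrams.length : Int) →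
      PySem.List.pyGetD anagrams t "" ∈ anagrams := by
    intro t h1 h2
    apply PySem.List.pyGetD_mem
    simp [PySem.Raise.InRange]; omega
  have hlen : ∀ a ∈ anagrams, ∀ b ∈ anagrams, a.toList.length ≤ b.toList.length := by
    intro a ha b hb
    rw [hpre a ha, hpre b hb]
  unfold find_metathesis_pairs_within_anagrams_alt
  simp only [PySem.List.foldl_append_if, PySem.List.foldl_append_singleton_eq_map,
    List.nil_append, List.append_assoc, PySem.List.foldl_append_eq_flatMap,
    List.map_id_fun', List.map_id, List.map_id']
  unfold pvCanon
  apply List.flatMap_congr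
  intro i hi
  rw [PySem.List.mem_pyRange_one] at hi
  rw [PySem.List.pyGetD_map_pyRange_of_nonneg _ _ _ _ hi.1 hi.2]
  have hfirst : List.filter
      (fun j => (PySem.List.pyGetD
        (List.map (fun k => List.filter
            (fun m => pvDiffsB (PySem.List.pyGetD anagrams k "") (PySem.List.pyGetD anagrams m "") == 2)
            (PySem.List.pyRange (k + 1) (PySem.List.len anagrams)))
          (PySem.List.pyRange 0 (PySem.List.len anagrams))) j []).contains i)
      (PySem.List.pyRange 0 i)
      = List.filter (pvQ anagrams i) (PySem.List.pyRange 0 i) := by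
    apply List.filter_congr
    intro j hj
    rw [PySem.List.mem_pyRange_one] at hj
    rw [PySem.List.pyGetD_map_pyRange_of_nonneg _ _ _ _ hj.1 (by omega)]
    have hmemi : i ∈ PySem.List.pyRange (j + 1) (PySem.List.len anagrams) := by
      rw [PySem.List.mem_pyRange_one]; omega
    have h1 : j < i := hj.2
    have h2 : i < (anagrams.length : Int) := by simpa [PySem.List.len] using hi.2
    simp [List.contains_eq_mem, List.mem_filter, hmemi, pvQ, h1, h2, Bool.beq_eq_decide_eq]
    rw [pvDiffsB_iff _ _ (hlen _ (hmem j hj.1 (by omega)) _ (hmem i (by omega) h2)),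
      pvCnt_symm (PySem.List.pyGetD anagrams j "") (PySem.List.pyGetD anagrams i "")]
  rw [hfirst]
  have hsecond : List.filter
      (fun m => pvDiffsB (PySem.List.pyGetD anagrams i "") (PySem.List.pyGetD anagrams m "") == 2)
      (PySem.List.pyRange (i + 1) (PySem.List.len anagrams))
      = List.filter (pvQ anagrams i) (PySem.List.pyRange (i + 1) (PySem.List.len anagrams)) := by
    apply List.filter_congr
    intro j hj
    rw [PySem.List.mem_pyRange_one] at hj
    have h2 : i < (anagrams.length : Int) := by simpa [PySem.List.len] using hi.2
    have h2j : j < (anagrams.length : Int) := by simpa [PySem.List.len] using hj.2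
    rw [pvDiffsB_eq_two _ _ (hlen _ (hmem i hi.1 h2) _ (hmem j (by omega) h2j))]
    rfl
  rw [hsecond]
  have hsplit : PySem.List.pyRange 0 (PySem.List.len anagrams)
      = PySem.List.pyRange 0 i ++ i :: PySem.List.pyRange (i + 1) (PySem.List.len anagrams) := by
    rw [PySem.List.pyRange_one_append 0 i (PySem.List.len anagrams) hi.1 (le_of_lt hi.2),
      PySem.List.pyRange_one_cons hi.2]
  rw [hsplit, List.filter_append, List.filter_cons]
  have hqii : pvQ anagrams i i = false := by simp [pvQ, pvCnt_self]
  simp [hqii]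

-- two reindexing steps shared by the A-side proof
theorem pv_enum_flat (xs : List String) (q : String → String → Bool) :
    (PySem.List.enumerate xs).flatMap (fun iw =>
      ((PySem.List.enumerate xs).filter (fun jw => q iw.2 jw.2)).map (fun jw => (iw.2, jw.2)))
    = xs.flatMap (fun wi => (xs.filter (fun wj => q wi wj)).map (fun wj => (wi, wj))) := by
  conv_rhs => rw [← PySem.List.map_snd_enumerate xs 0]
  rw [List.flatMap_map]
  apply List.flatMap_congr; intro iw _
  rw [List.filter_map, List.map_map]
  rfl

theorem pv_idx_flat (xs : List String) (q : String → String → Bool) :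
    xs.flatMap (fun wi => (xs.filter (fun wj => q wi wj)).map (fun wj => (wi, wj)))
    = (PySem.List.pyRange 0 (PySem.List.len xs)).flatMap (fun i =>
        ((PySem.List.pyRange 0 (PySem.List.len xs)).filter
          (fun j => q (PySem.List.pyGetD xs i "") (PySem.List.pyGetD xs j ""))).map
        (fun j => (PySem.List.pyGetD xs i "", PySem.List.pyGetD xs j ""))) := by
  conv_lhs => rw [← PySem.List.map_pyGetD_pyRange_zero xs ""]
  rw [List.flatMap_map]
  apply List.flatMap_congr; intro i _
  rw [List.filter_map, List.map_map]
  rfl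

-- under Pre_ (all words the same length) A also computes the canonical table
theorem A_canon (anagrams : List String)
    (hpre : Pre_find_metathesis_pairs_within_anagrams anagrams) :
    find_metathesis_pairs_within_anagrams anagrams = pvCanon anagrams := by
  unfold find_metathesis_pairs_within_anagrams
  simp only [PySem.List.foldl_append_if, PySem.List.foldl_append_eq_flatMap, List.nil_append]
  rw [pv_enum_flat anagrams (fun wi wj => pvDiffCountA wi.toList wj.toList == 2)]
  have hw : anagrams.flatMap (fun wi => (anagrams.filter
        (fun wj => pvDiffCountA wi.toList wj.toList == 2)).map (fun wj => (wi, wj)))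
      = anagrams.flatMap (fun wi => (anagrams.filter
        (fun wj => pvCnt wi wj == 2)).map (fun wj => (wi, wj))) := by
    apply List.flatMap_congr; intro wi hwi
    congr 1
    apply List.filter_congr; intro wj hwj
    rw [pvDiffCountA_eq wi wj (by rw [hpre wi hwi, hpre wj hwj])]
  rw [hw, pv_idx_flat anagrams (fun wi wj => pvCnt wi wj == 2)]
  rfl

-- ===== VERDICT (by name: the statement is the Claim_ definition above) =====
theorem find_metathesis_pairs_within_anagrams_spec : Claim_equal_find_metathesis_pairs_within_anagrams := by
  intro anagrams _ hpre
  unfold Spec_find_metathesis_pairs_within_anagrams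
  rw [A_canon anagrams hpre, B_canon anagrams hpre]
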